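-- pv_equiv track=rewrite | github.com/Josh-Decime/Geist-Agent | geist_agent/src/geist_agent/unveil/unveil_tools.py | _friendly_labels
-- ===== SOURCE A (Python) =====
-- def _friendly_labels(paths: list[str]) -> dict[str, str]:
--     """Make short, unique labels by escalating from filename -> parent/filename -> ..."""
--     parts_map = {p: p.split("/") for p in paths}
--     # start with just the filename
--     depth = {p: 1 for p in paths}  # how many tail segments to show
--     while True:
--         labels = {p: "/".join(parts_map[p][-depth[p]:]) for p in paths}
--         # count collisions
--         counts = {}
--         for lbl in labels.values():
--             counts[lbl] = counts.get(lbl, 0) + 1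
--         collided = [p for p, lbl in labels.items() if counts[lbl] > 1]
--         if not collided:
--             return labels
--         progressed = False
--         for p in collided:
--             if depth[p] < len(parts_map[p]):  # can add one more parent segment
--                 depth[p] += 1
--                 progressed = True
--         if not progressed:
--             # we've already promoted all the way to the full rel path; accept as-is
--             return labels
-- ===== SOURCE B (Python) =====
-- def _friendly_labels(paths: list[str]) -> dict[str, str]:
--     """Shortest unique tail labels, computed directly: for each path the label
--     depth is one more than its longest common reversed-segment prefix with any
--     other path (capped at the full path) -- no fixpoint iteration."""
--     ks = list(dict.fromkeys(paths))
--     out = {}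
--     for p in ks:
--         rp = p.split("/")[::-1]
--         m = 0
--         for q in ks:
--             if q != p:
--                 rq = q.split("/")[::-1]
--                 l = 0
--                 while l < len(rp) and l < len(rq) and rp[l] == rq[l]:
--                     l += 1
--                 if l > m:
--                     m = l
--         d = m + 1 if m + 1 < len(rp) else len(rp)
--         out[p] = "/".join(reversed(rp[:d]))
--     return out
-- ===== Notes on version B (the rewrite author's own statement) =====
-- stated objective: alternative
-- what changed: A iterates a global escalate-until-unique fixpoint (rebuilding all labels and collision counts every round); B computes each path's label depth directly in one pass per path as 1 + the longest common reversed-segment prefix with any other path, capped at the full path length.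
import Mathlib
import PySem

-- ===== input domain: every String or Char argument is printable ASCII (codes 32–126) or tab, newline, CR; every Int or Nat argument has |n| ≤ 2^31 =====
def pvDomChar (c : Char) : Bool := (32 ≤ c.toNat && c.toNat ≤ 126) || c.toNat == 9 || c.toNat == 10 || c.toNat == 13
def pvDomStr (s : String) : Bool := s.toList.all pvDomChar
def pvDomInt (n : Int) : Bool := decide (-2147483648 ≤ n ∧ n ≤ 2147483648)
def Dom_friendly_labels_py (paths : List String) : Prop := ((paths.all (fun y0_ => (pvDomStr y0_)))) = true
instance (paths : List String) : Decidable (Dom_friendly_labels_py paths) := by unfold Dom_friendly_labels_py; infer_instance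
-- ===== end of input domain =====

-- B replaces A's iterate-until-unique fixpoint by a direct per-path formula
-- (label depth = 1 + longest common reversed-segment prefix with any other path,
-- capped at the full path); objective: alternative algorithm, same exact output.

-- ===== PORT A =====

-- p.split("/"): the separator is the non-empty literal "/", so Python never raises; the getD [] default is unreachable
def pySplitSlash (p : String) : List String := (PySem.Str.split? p "/").getD []

-- labels = {p: "/".join(parts_map[p][-depth[p]:]) for p in paths}
def faLabels (paths : List String) (parts_map : PySem.Dict String (List String))
    (depth : PySem.Dict String Int) : PySem.Dict String String :=
  paths.foldl (fun d p =>
    d.insert p (PySem.Str.join "/"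
      (PySem.List.slice (parts_map.getD p []) (some (-(depth.getD p 0))) none)))
    PySem.Dict.empty

-- the 'while True' loop; fuel only guards termination (it is never exhausted: the loop
-- provably returns within (total length of paths) + 2 rounds)
def faLoop (paths : List String) (parts_map : PySem.Dict String (List String)) :
    PySem.Dict String Int → Nat → PySem.Dict String String
  | depth, 0 => faLabels paths parts_map depth
  | depth, fuel + 1 =>
    let labels := faLabels paths parts_map depth
    let counts : PySem.Dict String Int :=
      labels.values.foldl (fun d lbl => d.insert lbl (d.getD lbl 0 + 1)) PySem.Dict.empty
    let collided : List String :=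
      (labels.items.filter (fun pl => counts.getD pl.2 0 > 1)).map (·.1)
    if collided.isEmpty then labels
    else
      let st := collided.foldl (fun (s : PySem.Dict String Int × Bool) p =>
        if s.1.getD p 0 < PySem.List.len (parts_map.getD p []) then
          (s.1.insert p (s.1.getD p 0 + 1), true) else s) (depth, false)
      if !st.2 then labels
      else faLoop paths parts_map st.1 fuel

def friendly_labels_py (paths : List String) : List (String × String) :=
  let parts_map : PySem.Dict String (List String) :=
    paths.foldl (fun d p => d.insert p (pySplitSlash p)) PySem.Dict.empty
  let depth0 : PySem.Dict String Int :=
    paths.foldl (fun d p => d.insert p 1) PySem.Dict.empty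
  (faLoop paths parts_map depth0 (paths.foldl (fun n p => n + p.length) 0 + 2)).items

-- ===== PORT B =====

-- the inner 'while' of Source B: length of the common prefix of two reversed segment lists
def lcpRev : List String → List String → Nat
  | a :: as, b :: bs => if a == b then lcpRev as bs + 1 else 0
  | _, _ => 0

def friendly_labels_py_alt (paths : List String) : List (String × String) :=
  let ks := PySem.List.dedup paths         -- list(dict.fromkeys(paths))
  ks.map (fun p =>
    let rp := (pySplitSlash p).reverse
    let m := ks.foldl (fun m q =>
      if q ≠ p then (let l := lcpRev rp ((pySplitSlash q).reverse); if l > m then l else m)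
      else m) 0
    let d := if m + 1 < rp.length then m + 1 else rp.length
    (p, PySem.Str.join "/" (rp.take d).reverse))

-- ===== PRECONDITION & SPEC =====
def Spec_friendly_labels_py (paths : List String) (out : List (String × String)) : Prop := out = friendly_labels_py_alt paths
instance (paths : List String) (out : List (String × String)) : Decidable (Spec_friendly_labels_py paths out) := by unfold Spec_friendly_labels_py; infer_instance

-- ===== CLAIM (what is proved, stated in full; the proofs are below) =====
def Claim_equal_friendly_labels_py : Prop := ∀ (paths : List String), Dom_friendly_labels_py paths → Spec_friendly_labels_py paths (friendly_labels_py paths)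

-- ===== LEMMAS AND PROOFS =====


def mySplit : List Char → List (List Char)
  | [] => [[]]
  | c :: r => if c = '/' then [] :: mySplit r else (mySplit r).modifyHead (c :: ·)

theorem mySplit_ne_nil (s : List Char) : mySplit s ≠ [] := by
  induction s with
  | nil => simp [mySplit]
  | cons c r ih =>
    simp only [mySplit]
    split
    · simp
    · intro h; exact ih (by simpa using List.modifyHead_eq_nil_iff.mp h)

theorem go_eq (fuel : Nat) : ∀ (l cur : List Char) (acc : List (List Char)),
    l.length < fuel →
    PySem.Chars.splitOn.go ['/'] fuel l cur acc
      = acc.reverse ++ (mySplit l).modifyHead (cur.reverse ++ ·) := by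
  induction fuel with
  | zero => intro l cur acc h; omega
  | succ fuel ih =>
    intro l cur acc h
    cases l with
    | nil => simp [PySem.Chars.splitOn.go, mySplit]
    | cons c rest =>
      by_cases hc : c = '/'
      · subst hc
        rw [show PySem.Chars.splitOn.go ['/'] (fuel+1) ('/' :: rest) cur acc
              = PySem.Chars.splitOn.go ['/'] fuel (List.drop 1 ('/' :: rest)) [] (cur.reverse :: acc) by
            simp [PySem.Chars.splitOn.go, List.isPrefixOf]]
        rw [ih _ _ _ (by simpa using Nat.lt_of_succ_lt_succ h)]
        simp [mySplit]
        cases h' : mySplit rest with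
        | nil => exact absurd h' (mySplit_ne_nil rest)
        | cons a as => simp
      · rw [show PySem.Chars.splitOn.go ['/'] (fuel+1) (c :: rest) cur acc
              = PySem.Chars.splitOn.go ['/'] fuel rest (c :: cur) acc by
            rw [PySem.Chars.splitOn.go]
            simp only [List.isPrefixOf, List.isPrefixOf_nil_left, Bool.and_eq_true, beq_iff_eq]
            rw [if_neg (by simp [Ne.symm hc])]]
        rw [ih _ _ _ (by simpa using Nat.lt_of_succ_lt_succ h)]
        simp [mySplit, hc]
        cases h' : mySplit rest with
        | nil => exact absurd h' (mySplit_ne_nil rest)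
        | cons a as => simp

theorem splitOn_eq (s : List Char) : PySem.Chars.splitOn s ['/'] = mySplit s := by
  rw [PySem.Chars.splitOn, go_eq (s.length + 1) s [] [] (by omega)]
  simp
  cases h' : mySplit s with
  | nil => exact absurd h' (mySplit_ne_nil s)
  | cons a as => simp

theorem mySplit_slashfree {s seg : List Char} (h : seg ∈ mySplit s) : '/' ∉ seg := by
  induction s generalizing seg with
  | nil => simp [mySplit] at h; simp [h]
  | cons c r ih =>
    simp only [mySplit] at h
    split at h
    · rcases List.mem_cons.mp h with h | h
      · simp [h]
      · exact ih h
    · rename_i hc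
      cases h' : mySplit r with
      | nil => exact absurd h' (mySplit_ne_nil r)
      | cons a as =>
        rw [h'] at h
        simp only [List.modifyHead_cons] at h
        rcases List.mem_cons.mp h with h | h
        · subst h
          intro hm
          rcases List.mem_cons.mp hm with hm | hm
          · exact hc hm.symm
          · exact ih (h' ▸ List.mem_cons_self) hm
        · exact ih (h' ▸ List.mem_cons_of_mem a h)

theorem mySplit_join (s : List Char) : PySem.Chars.join ['/'] (mySplit s) = s := by
  induction s with
  | nil => simp [mySplit, PySem.Chars.join_singleton]
  | cons c r ih =>
    simp only [mySplit]
    split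
    · rename_i hc
      cases h' : mySplit r with
      | nil => exact absurd h' (mySplit_ne_nil r)
      | cons a as =>
        rw [h'] at ih
        rw [PySem.Chars.join_cons_cons]
        simp [PySem.Chars.join] at ih ⊢
        simp [hc, ih]
    · cases h' : mySplit r with
      | nil => exact absurd h' (mySplit_ne_nil r)
      | cons a as =>
        rw [h'] at ih
        simp only [List.modifyHead_cons]
        cases as with
        | nil =>
          rw [PySem.Chars.join_singleton] at ih
          rw [PySem.Chars.join_singleton, ih]
        | cons b bs =>
          rw [PySem.Chars.join_cons_cons] at ih ⊢
          simp [ih.symm]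

theorem mySplit_length_le (s : List Char) : (mySplit s).length ≤ s.length + 1 := by
  induction s with
  | nil => simp [mySplit]
  | cons c r ih =>
    simp only [mySplit]
    split
    · simpa using Nat.succ_le_succ ih
    · calc ((mySplit r).modifyHead (c :: ·)).length = (mySplit r).length := by simp
        _ ≤ r.length + 1 := ih
        _ ≤ (c :: r).length + 1 := by simp

theorem headSep_inj {x y u v : List Char} (hx : '/' ∉ x) (hy : '/' ∉ y)
    (h : x ++ '/' :: u = y ++ '/' :: v) : x = y ∧ u = v := by
  induction x generalizing y with
  | nil =>
    cases y with
    | nil => simpa using h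
    | cons d ys =>
      simp at h
      exact absurd (by simp [← h.1] : '/' ∈ d :: ys) hy
  | cons c xs ih =>
    cases y with
    | nil =>
      simp at h
      exact absurd (by simp [h.1] : '/' ∈ c :: xs) hx
    | cons d ys =>
      simp only [List.cons_append, List.cons.injEq] at h
      obtain ⟨rfl, h2⟩ := h
      obtain ⟨h3, h4⟩ := ih (fun hm => hx (List.mem_cons_of_mem _ hm))
        (fun hm => hy (List.mem_cons_of_mem _ hm)) h2
      exact ⟨by rw [h3], h4⟩

theorem joinChars_inj {a b : List (List Char)} (ha : a ≠ []) (hb : b ≠ [])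
    (hfa : ∀ x ∈ a, '/' ∉ x) (hfb : ∀ x ∈ b, '/' ∉ x)
    (h : PySem.Chars.join ['/'] a = PySem.Chars.join ['/'] b) : a = b := by
  induction a generalizing b with
  | nil => exact absurd rfl ha
  | cons x xs ih =>
    cases b with
    | nil => exact absurd rfl hb
    | cons y ys =>
      cases xs with
      | nil =>
        cases ys with
        | nil => simpa [PySem.Chars.join_singleton] using h
        | cons y' ys' =>
          rw [PySem.Chars.join_singleton, PySem.Chars.join_cons_cons] at h
          exact absurd (h ▸ (by simp : '/' ∈ y ++ ['/'] ++ PySem.Chars.join ['/'] (y' :: ys')))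
            (hfa x List.mem_cons_self)
      | cons x' xs' =>
        cases ys with
        | nil =>
          rw [PySem.Chars.join_singleton, PySem.Chars.join_cons_cons] at h
          exact absurd (h ▸ (by simp : '/' ∈ x ++ ['/'] ++ PySem.Chars.join ['/'] (x' :: xs')))
            (hfb y List.mem_cons_self)
        | cons y' ys' =>
          rw [PySem.Chars.join_cons_cons, PySem.Chars.join_cons_cons] at h
          simp only [List.append_assoc, List.singleton_append] at h
          obtain ⟨h1, h2⟩ := headSep_inj (hfa x List.mem_cons_self) (hfb y List.mem_cons_self) h
          have := ih (by simp) (by simp)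
            (fun z hz => hfa z (List.mem_cons_of_mem _ hz))
            (fun z hz => hfb z (List.mem_cons_of_mem _ hz)) h2
          rw [h1, this]

-- ---- section 2 ----
theorem parts_eq (p : String) : pySplitSlash p = (mySplit p.toList).map String.ofList := by
  rw [pySplitSlash, PySem.Str.split?, PySem.Chars.split?]
  simp [splitOn_eq]

theorem parts_ne_nil (p : String) : pySplitSlash p ≠ [] := by
  rw [parts_eq]
  simpa using mySplit_ne_nil p.toList

theorem parts_slashfree {p : String} {seg : String} (h : seg ∈ pySplitSlash p) :
    '/' ∉ seg.toList := by
  rw [parts_eq] at h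
  obtain ⟨cs, hcs, rfl⟩ := List.mem_map.mp h
  rw [String.toList_ofList]
  exact mySplit_slashfree hcs

theorem parts_join (p : String) : PySem.Str.join "/" (pySplitSlash p) = p := by
  rw [parts_eq, PySem.Str.join]
  have : (((mySplit p.toList).map String.ofList).map String.toList) = mySplit p.toList := by
    simp [List.map_map, Function.comp_def, String.toList_ofList]
  rw [this]
  have : "/".toList = ['/'] := rfl
  rw [this, mySplit_join, String.ofList_toList]

theorem parts_length_le (p : String) : (pySplitSlash p).length ≤ p.toList.length + 1 := by
  rw [parts_eq]
  simpa using mySplit_length_le p.toList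

theorem joinStr_inj {a b : List String} (ha : a ≠ []) (hb : b ≠ [])
    (hfa : ∀ x ∈ a, '/' ∉ x.toList) (hfb : ∀ x ∈ b, '/' ∉ x.toList)
    (h : PySem.Str.join "/" a = PySem.Str.join "/" b) : a = b := by
  have h2 : PySem.Chars.join ['/'] (a.map String.toList)
      = PySem.Chars.join ['/'] (b.map String.toList) := by
    have := congrArg String.toList h
    rwa [PySem.Str.toList_join, PySem.Str.toList_join] at this
  have h3 := joinChars_inj (by simpa using ha) (by simpa using hb)
    (by intro x hx; obtain ⟨y, hy, rfl⟩ := List.mem_map.mp hx; exact hfa y hy)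
    (by intro x hx; obtain ⟨y, hy, rfl⟩ := List.mem_map.mp hx; exact hfb y hy) h2
  have := congrArg (List.map String.ofList) h3
  simpa [List.map_map, Function.comp_def, String.ofList_toList] using this

-- ---- section 3 ----
theorem lcpRev_le_left (a b : List String) : lcpRev a b ≤ a.length := by
  induction a generalizing b with
  | nil => simp [lcpRev]
  | cons x xs ih =>
    cases b with
    | nil => simp [lcpRev]
    | cons y ys =>
      simp only [lcpRev]
      split
      · simpa using ih ys
      · simp

theorem lcpRev_comm (a b : List String) : lcpRev a b = lcpRev b a := by
  induction a generalizing b with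
  | nil => cases b <;> simp [lcpRev]
  | cons x xs ih =>
    cases b with
    | nil => simp [lcpRev]
    | cons y ys =>
      simp only [lcpRev, beq_iff_eq]
      by_cases hxy : x = y
      · simp [hxy, ih ys]
      · simp [hxy, Ne.symm hxy]

theorem take_eq_of_le_lcpRev {a b : List String} {d : Nat} (h : d ≤ lcpRev a b) :
    a.take d = b.take d := by
  induction a generalizing b d with
  | nil =>
    cases b with
    | nil => rfl
    | cons y ys => simp [lcpRev] at h; simp [h]
  | cons x xs ih =>
    cases b with
    | nil => simp [lcpRev] at h; simp [h]
    | cons y ys =>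
      simp only [lcpRev, beq_iff_eq] at h
      cases d with
      | zero => simp
      | succ d =>
        split at h
        · rename_i hxy
          simp [List.take_succ_cons, hxy, ih (Nat.le_of_succ_le_succ h)]
        · omega

theorem le_lcpRev_of_take_eq {a b : List String} {d : Nat} (hd : d ≤ a.length)
    (h : a.take d = b.take d) : d ≤ lcpRev a b := by
  induction a generalizing b d with
  | nil => simp at hd; subst hd; simp
  | cons x xs ih =>
    cases d with
    | zero => simp
    | succ d =>
      cases b with
      | nil => simp at h
      | cons y ys =>
        simp only [List.take_succ_cons, List.cons.injEq] at h
        rw [show lcpRev (x :: xs) (y :: ys) = if x == y then lcpRev xs ys + 1 else 0 from rfl,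
          if_pos (beq_iff_eq.mpr h.1)]
        exact Nat.succ_le_succ (ih (by simpa using hd) h.2)

theorem eq_of_lcpRev_full {a b : List String} (hl : a.length = b.length)
    (h : a.length ≤ lcpRev a b) : a = b := by
  have := take_eq_of_le_lcpRev h
  rwa [List.take_of_length_le (le_refl _), List.take_of_length_le (by omega)] at this
theorem get?_cmap {α : Type} (g : String → α) (paths : List String)
    (d : PySem.Dict String α) (x : String) :
    (paths.foldl (fun d p => d.insert p (g p)) d).get? x
      = if x ∈ paths then some (g x) else d.get? x := by
  induction paths generalizing d with
  | nil => simp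
  | cons p ps ih =>
    simp only [List.foldl_cons, ih]
    by_cases hps : x ∈ ps
    · simp [hps]
    · by_cases hxp : x = p
      · subst hxp
        simp [hps, PySem.Dict.get?_insert_self]
      · simp [hps, hxp, PySem.Dict.get?_insert_of_ne d (g p) hxp]

theorem getD_cmap {α : Type} (g : String → α) (paths : List String) (x : String)
    (hx : x ∈ paths) (dflt : α) :
    (paths.foldl (fun d p => d.insert p (g p)) PySem.Dict.empty).getD x dflt = g x := by
  rw [PySem.Dict.getD_eq_get?_getD, get?_cmap, if_pos hx]
  rfl

theorem items_cmap {α : Type} (g : String → α) (paths : List String) (dflt : α) :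
    (paths.foldl (fun d p => d.insert p (g p)) PySem.Dict.empty).items
      = (PySem.List.dedup paths).map (fun p => (p, g p)) := by
  have hkeys : (paths.foldl (fun d p => d.insert p (g p)) PySem.Dict.empty).keys
      = PySem.List.dedup paths := by
    rw [PySem.Dict.keys_foldl_insert paths (fun _ p => g p) PySem.Dict.empty]
    rw [show (PySem.Dict.empty : PySem.Dict String α).keys = [] from rfl]
    rw [PySem.Set.update_nil_left, PySem.List.dedup_eq_ofList]
  have hnd : (paths.foldl (fun d p => d.insert p (g p)) PySem.Dict.empty).keys.Nodup := by
    apply PySem.Dict.nodup_keys_foldl_insert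
    simp [show (PySem.Dict.empty : PySem.Dict String α).keys = [] from rfl]
  rw [PySem.Dict.items_eq_map_keys _ hnd dflt, hkeys]
  apply List.map_congr_left
  intro x hx
  rw [getD_cmap g paths x ((PySem.List.mem_dedup paths x).mp hx) dflt]

def Lp (p : String) : Nat := (pySplitSlash p).length

def revp (p : String) : List String := (pySplitSlash p).reverse

def Mp (ks : List String) (p : String) : Nat :=
  ks.foldl (fun m q =>
    if q ≠ p then (if lcpRev (revp p) (revp q) > m then lcpRev (revp p) (revp q) else m)
    else m) 0

def Dp (ks : List String) (p : String) : Nat := min (Mp ks p + 1) (Lp p)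

def labelAt (p : String) (d : Nat) : String :=
  PySem.Str.join "/" ((revp p).take d).reverse

theorem one_le_Lp (p : String) : 1 ≤ Lp p := by
  rw [Lp]
  cases h : pySplitSlash p with
  | nil => exact absurd h (parts_ne_nil p)
  | cons a as => simp

theorem length_revp (p : String) : (revp p).length = Lp p := by simp [revp, Lp]

theorem Dp_bounds (ks : List String) (p : String) : 1 ≤ Dp ks p ∧ Dp ks p ≤ Lp p := by
  constructor
  · exact le_min (by omega) (one_le_Lp p)
  · exact min_le_right _ _

theorem Mfold_general (p : String) (ks : List String) (acc : Nat) :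
    acc ≤ (ks.foldl (fun m q =>
        if q ≠ p then (if lcpRev (revp p) (revp q) > m then lcpRev (revp p) (revp q) else m) else m) acc)
    ∧ ((ks.foldl (fun m q =>
        if q ≠ p then (if lcpRev (revp p) (revp q) > m then lcpRev (revp p) (revp q) else m) else m) acc) = acc
        ∨ ∃ q ∈ ks, q ≠ p ∧ lcpRev (revp p) (revp q)
            = (ks.foldl (fun m q =>
                if q ≠ p then (if lcpRev (revp p) (revp q) > m then lcpRev (revp p) (revp q) else m) else m) acc))
    ∧ (∀ q ∈ ks, q ≠ p → lcpRev (revp p) (revp q)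
        ≤ (ks.foldl (fun m q =>
            if q ≠ p then (if lcpRev (revp p) (revp q) > m then lcpRev (revp p) (revp q) else m) else m) acc)) := by
  induction ks generalizing acc with
  | nil => simp
  | cons r rs ih =>
    simp only [List.foldl_cons]
    by_cases hr : r ≠ p
    · simp only [if_pos hr]
      by_cases hgt : lcpRev (revp p) (revp r) > acc
      · simp only [hgt, if_pos]
        obtain ⟨h1, h2, h3⟩ := ih (lcpRev (revp p) (revp r))
        refine ⟨by omega, ?_, ?_⟩
        · rcases h2 with h2 | ⟨q, hq, hqp, hql⟩
          · exact Or.inr ⟨r, by simp, hr, h2.symm⟩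
          · exact Or.inr ⟨q, by simp [hq], hqp, hql⟩
        · intro q hq hqp
          rcases List.mem_cons.mp hq with rfl | hq
          · omega
          · exact h3 q hq hqp
      · simp only [if_neg hgt]
        obtain ⟨h1, h2, h3⟩ := ih acc
        refine ⟨h1, ?_, ?_⟩
        · rcases h2 with h2 | ⟨q, hq, hqp, hql⟩
          · exact Or.inl h2
          · exact Or.inr ⟨q, by simp [hq], hqp, hql⟩
        · intro q hq hqp
          rcases List.mem_cons.mp hq with rfl | hq
          · omega
          · exact h3 q hq hqp
    · simp only [if_neg hr]
      obtain ⟨h1, h2, h3⟩ := ih acc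
      refine ⟨h1, ?_, ?_⟩
      · rcases h2 with h2 | ⟨q, hq, hqp, hql⟩
        · exact Or.inl h2
        · exact Or.inr ⟨q, by simp [hq], hqp, hql⟩
      · intro q hq hqp
        rcases List.mem_cons.mp hq with rfl | hq
        · exact absurd (not_not.mp hr) hqp
        · exact h3 q hq hqp

theorem Mp_max {ks : List String} {p q : String} (hq : q ∈ ks) (hne : q ≠ p) :
    lcpRev (revp p) (revp q) ≤ Mp ks p :=
  (Mfold_general p ks 0).2.2 q hq hne

theorem Mp_attained (ks : List String) (p : String) :
    Mp ks p = 0 ∨ ∃ q ∈ ks, q ≠ p ∧ lcpRev (revp p) (revp q) = Mp ks p := by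
  rcases (Mfold_general p ks 0).2.1 with h | h
  · exact Or.inl h
  · exact Or.inr h

theorem labelAt_inj {p q : String} {dp dq : Nat}
    (hp1 : 1 ≤ dp) (hp2 : dp ≤ Lp p) (hq1 : 1 ≤ dq) (hq2 : dq ≤ Lp q) :
    labelAt p dp = labelAt q dq ↔ dp = dq ∧ dp ≤ lcpRev (revp p) (revp q) := by
  constructor
  · intro h
    have hA : ((revp p).take dp).reverse ≠ [] := by
      apply List.ne_nil_of_length_pos
      rw [List.length_reverse, List.length_take, length_revp]
      omega
    have hB : ((revp q).take dq).reverse ≠ [] := by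
      apply List.ne_nil_of_length_pos
      rw [List.length_reverse, List.length_take, length_revp]
      omega
    have heq := joinStr_inj hA hB
      (by intro x hx
          exact parts_slashfree (show x ∈ pySplitSlash p by
            have := List.mem_reverse.mp hx
            have := List.mem_of_mem_take this
            exact List.mem_reverse.mp (by simpa [revp] using this)))
      (by intro x hx
          exact parts_slashfree (show x ∈ pySplitSlash q by
            have := List.mem_reverse.mp hx
            have := List.mem_of_mem_take this
            exact List.mem_reverse.mp (by simpa [revp] using this)))
      h
    have htake : (revp p).take dp = (revp q).take dq := by
      have := congrArg List.reverse heq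
      simpa using this
    have hlen : dp = dq := by
      have := congrArg List.length htake
      rw [List.length_take, List.length_take, length_revp, length_revp] at this
      omega
    subst hlen
    exact ⟨rfl, le_lcpRev_of_take_eq (by rw [length_revp]; omega) htake⟩
  · rintro ⟨rfl, hle⟩
    rw [labelAt, labelAt, take_eq_of_le_lcpRev hle]

theorem full_distinct {p q : String} (hne : p ≠ q) (hl : Lp p = Lp q)
    (h : Lp p ≤ lcpRev (revp p) (revp q)) : False := by
  have : revp p = revp q := by
    apply eq_of_lcpRev_full
    · rw [length_revp, length_revp, hl]
    · rw [length_revp]; exact h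
  have hparts : pySplitSlash p = pySplitSlash q := by
    have := congrArg List.reverse this
    simpa [revp] using this
  exact hne (by rw [← parts_join p, ← parts_join q, hparts])

theorem collide_of_lt {ks : List String} {p : String} {k : Nat}
    (hp : p ∈ ks) (hk1 : 1 ≤ k) (hk : k < Dp ks p) :
    ∃ q ∈ ks, q ≠ p ∧ labelAt q (min k (Dp ks q)) = labelAt p (min k (Dp ks p)) := by
  have hkM : k ≤ Mp ks p := by
    have := min_le_left (Mp ks p + 1) (Lp p)
    rw [Dp] at hk; omega
  have hkL : k ≤ Lp p := by
    have := (Dp_bounds ks p).2; omega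
  rcases Mp_attained ks p with h0 | ⟨q, hq, hqp, hql⟩
  · omega
  · have hlcp : k ≤ lcpRev (revp p) (revp q) := by omega
    have hlcpq : k ≤ lcpRev (revp q) (revp p) := by rw [lcpRev_comm]; exact hlcp
    have hLq : k ≤ Lp q := by
      have := lcpRev_le_left (revp q) (revp p)
      rw [length_revp] at this; omega
    have hDq : k ≤ Dp ks q := by
      have hMq : lcpRev (revp q) (revp p) ≤ Mp ks q := Mp_max hp (Ne.symm hqp)
      rw [Dp]; exact le_min (by omega) hLq
    refine ⟨q, hq, hqp, ?_⟩
    rw [min_eq_left hDq, min_eq_left (by omega : k ≤ Dp ks p)]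
    exact (labelAt_inj hk1 hLq hk1 hkL).mpr ⟨rfl, hlcpq⟩

theorem no_bump_of_ge {ks : List String} {p q : String} {k : Nat}
    (hp : p ∈ ks) (hq : q ∈ ks) (hne : q ≠ p) (hk : Dp ks p ≤ k)
    (hlab : labelAt q (min k (Dp ks q)) = labelAt p (min k (Dp ks p))) :
    Dp ks p = Lp p ∧ k = Dp ks p ∧ k < Dp ks q := by
  have hDpb := Dp_bounds ks p
  have hDqb := Dp_bounds ks q
  rw [min_eq_right hk] at hlab
  have hinj := (labelAt_inj (p := q) (q := p) (dp := min k (Dp ks q)) (dq := Dp ks p)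
    (le_min (by omega) hDqb.1) (le_trans (min_le_right _ _) hDqb.2)
    hDpb.1 hDpb.2).mp hlab
  obtain ⟨hdeq, hdle⟩ := hinj
  have hlcp_pq : Dp ks p ≤ lcpRev (revp q) (revp p) := hdeq ▸ hdle
  have hlcp' : Dp ks p ≤ lcpRev (revp p) (revp q) := by rw [lcpRev_comm]; exact hlcp_pq
  have hDL : Dp ks p = Lp p := by
    by_contra hne2
    have hlt : Dp ks p < Lp p := lt_of_le_of_ne hDpb.2 hne2
    have hMp : Dp ks p = Mp ks p + 1 := by rw [Dp] at hlt ⊢; omega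
    have := Mp_max hq hne
    omega
  have hLq_ge : Lp p ≤ lcpRev (revp q) (revp p) := hDL ▸ hlcp_pq
  have hLqge : Lp p ≤ Lp q := by
    have := lcpRev_le_left (revp q) (revp p)
    rw [length_revp] at this; omega
  have hLne : Lp p ≠ Lp q := by
    intro hleq
    exact full_distinct (Ne.symm hne) hleq (by rw [← hDL]; exact hlcp')
  have hDq_big : Dp ks p < Dp ks q := by
    have hMq : Lp p ≤ Mp ks q := le_trans hLq_ge (Mp_max hp (Ne.symm hne))
    rw [Dp, Dp] at *
    omega
  have hkd : k = Dp ks p ∧ k < Dp ks q := by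
    rcases Nat.le_total k (Dp ks q) with hck | hck
    · rw [min_eq_left hck] at hdeq; omega
    · rw [min_eq_right hck] at hdeq; omega
  exact ⟨hDL, hkd.1, hkd.2⟩
theorem two_le_length {l : List String} {x y : String} (hx : x ∈ l) (hy : y ∈ l)
    (hne : x ≠ y) : 2 ≤ l.length := by
  obtain ⟨l1, l2, rfl⟩ := List.append_of_mem hx
  have hy' : y ∈ l1 ++ l2 := by
    rcases List.mem_append.mp hy with h | h
    · exact List.mem_append.mpr (Or.inl h)
    · rcases List.mem_cons.mp h with h | h
      · exact absurd h.symm hne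
      · exact List.mem_append.mpr (Or.inr h)
  have := List.length_pos_of_mem hy'
  simp at this ⊢
  omega

theorem count_gt_one_iff {ks : List String} (hnd : ks.Nodup) {p : String} (hp : p ∈ ks)
    (lab : String → String) :
    1 < (ks.map lab).count (lab p) ↔ ∃ q ∈ ks, q ≠ p ∧ lab q = lab p := by
  have hcnt : (ks.map lab).count (lab p) = ks.countP (fun q => lab q == lab p) := by
    simp [List.count, List.countP_map, Function.comp_def]
  rw [hcnt]
  constructor
  · intro h
    by_contra hno
    push_neg at hno
    have himp : ∀ q ∈ ks, (fun q => lab q == lab p) q → (q == p) = true := by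
      intro q hq hl
      by_cases hqp : q = p
      · simp [hqp]
      · exact absurd (by simpa using hl) (hno q hq hqp)
    have := List.countP_mono_left himp
    rw [show ks.countP (· == p) = ks.count p from rfl,
      List.count_eq_one_of_mem hnd hp] at this
    omega
  · rintro ⟨q, hq, hqp, hl⟩
    rw [List.countP_eq_length_filter]
    have hpf : p ∈ ks.filter (fun q => lab q == lab p) := by
      rw [List.mem_filter]; exact ⟨hp, by simp⟩
    have hqf : q ∈ ks.filter (fun q => lab q == lab p) := by
      rw [List.mem_filter]; exact ⟨hq, by simp [hl]⟩
    exact two_le_length hqf hpf hqp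

theorem foldupd (W : String → Int) (cs : List String) (hnd : cs.Nodup)
    (d : PySem.Dict String Int) (b : Bool) :
    (∀ x : String,
      ((cs.foldl (fun (s : PySem.Dict String Int × Bool) p =>
          if s.1.getD p 0 < W p then (s.1.insert p (s.1.getD p 0 + 1), true) else s)
        (d, b)).1.getD x 0)
        = if x ∈ cs ∧ d.getD x 0 < W x then d.getD x 0 + 1 else d.getD x 0)
    ∧ ((cs.foldl (fun (s : PySem.Dict String Int × Bool) p =>
          if s.1.getD p 0 < W p then (s.1.insert p (s.1.getD p 0 + 1), true) else s)
        (d, b)).2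
        = (b || cs.any (fun p => decide (d.getD p 0 < W p)))) := by
  induction cs generalizing d b with
  | nil => simp
  | cons c cs ih =>
    have hc : c ∉ cs := (List.nodup_cons.mp hnd).1
    have hnd' : cs.Nodup := (List.nodup_cons.mp hnd).2
    simp only [List.foldl_cons]
    by_cases hlt : d.getD c 0 < W c
    · rw [if_pos hlt]
      obtain ⟨ih1, ih2⟩ := ih hnd' (d.insert c (d.getD c 0 + 1)) true
      constructor
      · intro x
        rw [ih1 x]
        by_cases hxc : x = c
        · subst hxc
          rw [PySem.Dict.getD_insert_self]
          simp [hc, hlt]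
        · rw [PySem.Dict.getD_insert d c x _ 0, if_neg hxc]
          by_cases hxcs : x ∈ cs <;> simp [hxcs, hxc]
      · rw [ih2]
        simp [hlt]
    · rw [if_neg hlt]
      obtain ⟨ih1, ih2⟩ := ih hnd' d b
      constructor
      · intro x
        rw [ih1 x]
        by_cases hxc : x = c
        · subst hxc
          simp [hc, hlt]
        · by_cases hxcs : x ∈ cs <;> simp [hxcs, hxc]
      · rw [ih2]
        simp [hlt]
theorem faLabels_items (paths : List String) (parts_map : PySem.Dict String (List String))
    (depth : PySem.Dict String Int) (e : String → Nat)
    (hpm : ∀ p ∈ paths, parts_map.getD p [] = pySplitSlash p)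
    (hd : ∀ p ∈ paths, depth.getD p 0 = ((e p : Nat) : Int))
    (he : ∀ p ∈ paths, 1 ≤ e p ∧ e p ≤ Lp p) :
    (faLabels paths parts_map depth).items
      = (PySem.List.dedup paths).map (fun p => (p, labelAt p (e p))) := by
  rw [faLabels, items_cmap _ _ ""]
  apply List.map_congr_left
  intro p hp
  have hpp := (PySem.List.mem_dedup paths p).mp hp
  rw [hpm p hpp, hd p hpp]
  have h1 := (he p hpp).1
  congr 1
  rw [PySem.List.slice_from_neg_natCast _ _ h1, labelAt, revp, List.take_reverse,
    List.reverse_reverse]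

theorem alt_eq (paths : List String) :
    friendly_labels_py_alt paths
      = (PySem.List.dedup paths).map
          (fun p => (p, labelAt p (Dp (PySem.List.dedup paths) p))) := by
  rw [friendly_labels_py_alt]
  apply List.map_congr_left
  intro p hp
  show (p, PySem.Str.join "/" (((pySplitSlash p).reverse).take
      (if Mp (PySem.List.dedup paths) p + 1 < ((pySplitSlash p).reverse).length
       then Mp (PySem.List.dedup paths) p + 1
       else ((pySplitSlash p).reverse).length)).reverse)
    = (p, labelAt p (Dp (PySem.List.dedup paths) p))
  have harg : (if Mp (PySem.List.dedup paths) p + 1 < ((pySplitSlash p).reverse).length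
      then Mp (PySem.List.dedup paths) p + 1
      else ((pySplitSlash p).reverse).length) = Dp (PySem.List.dedup paths) p := by
    rw [List.length_reverse, show (pySplitSlash p).length = Lp p from rfl, Dp]
    split <;> omega
  rw [harg, labelAt, revp]
set_option maxHeartbeats 2000000 in
theorem faLoop_invariant (paths : List String) (parts_map : PySem.Dict String (List String))
    (hpm : ∀ p ∈ paths, parts_map.getD p [] = pySplitSlash p) :
    ∀ (fuel k : Nat) (depth : PySem.Dict String Int), 1 ≤ k →
      (∀ p ∈ paths, depth.getD p 0 = ((min k (Dp (PySem.List.dedup paths) p) : Nat) : Int)) →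
      (∀ p ∈ paths, Dp (PySem.List.dedup paths) p < k + fuel) →
      (faLoop paths parts_map depth fuel).items
        = (PySem.List.dedup paths).map
            (fun p => (p, labelAt p (Dp (PySem.List.dedup paths) p))) := by
  intro fuel
  induction fuel with
  | zero =>
    intro k depth hk hd hb
    show (faLabels paths parts_map depth).items = _
    rw [faLabels_items paths parts_map depth (fun p => min k (Dp (PySem.List.dedup paths) p))
      hpm hd (fun p hp => ⟨le_min hk (Dp_bounds _ p).1,
        le_trans (min_le_right _ _) (Dp_bounds _ p).2⟩)]
    apply List.map_congr_left
    intro p hp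
    have hble : Dp (PySem.List.dedup paths) p ≤ k := by
      have := hb p ((PySem.List.mem_dedup paths p).mp hp); omega
    rw [min_eq_right hble]
  | succ fuel ih =>
    intro k depth hk hd hb
    have hnodup : (PySem.List.dedup paths).Nodup := PySem.List.nodup_dedup paths
    have hlab := faLabels_items paths parts_map depth
      (fun p => min k (Dp (PySem.List.dedup paths) p)) hpm hd
      (fun p hp => ⟨le_min hk (Dp_bounds _ p).1,
        le_trans (min_le_right _ _) (Dp_bounds _ p).2⟩)
    have hval : (faLabels paths parts_map depth).values
        = (PySem.List.dedup paths).map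
            (fun p => labelAt p (min k (Dp (PySem.List.dedup paths) p))) := by
      have hv : (faLabels paths parts_map depth).values
          = (faLabels paths parts_map depth).items.map (·.2) := rfl
      rw [hv, hlab, List.map_map]
      simp [Function.comp_def]
    simp only [faLoop]
    rw [hlab, hval]
    beta_reduce
    have hcol : (List.map (fun (x : String × String) => x.1)
          (List.filter
            (fun pl => decide
              ((List.foldl (fun d lbl => d.insert lbl (d.getD lbl 0 + 1))
                  (PySem.Dict.empty : PySem.Dict String Int)
                  (List.map (fun p => labelAt p (min k (Dp (PySem.List.dedup paths) p)))
                    (PySem.List.dedup paths))).getD pl.2 0 > 1))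
            (List.map (fun p => (p, labelAt p (min k (Dp (PySem.List.dedup paths) p))))
              (PySem.List.dedup paths))))
        = (PySem.List.dedup paths).filter
            (fun p => decide (1 < (List.map (fun q => labelAt q (min k (Dp (PySem.List.dedup paths) q)))
                (PySem.List.dedup paths)).count
                  (labelAt p (min k (Dp (PySem.List.dedup paths) p))))) := by
      rw [List.filter_map, List.map_map]
      have hid : ((fun (x : String × String) => x.1)
          ∘ (fun p => (p, labelAt p (min k (Dp (PySem.List.dedup paths) p))))) = id := by
        funext p; rfl
      rw [hid, List.map_id]
      apply List.filter_congr
      intro p hp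
      simp only [Function.comp_apply]
      have hgd : (List.foldl (fun d lbl => d.insert lbl (d.getD lbl 0 + 1))
            (PySem.Dict.empty : PySem.Dict String Int)
            (List.map (fun q => labelAt q (min k (Dp (PySem.List.dedup paths) q)))
              (PySem.List.dedup paths))).getD
            (labelAt p (min k (Dp (PySem.List.dedup paths) p))) 0
          = (PySem.Dict.empty : PySem.Dict String Int).getD
              (labelAt p (min k (Dp (PySem.List.dedup paths) p))) 0
            + ((List.map (fun q => labelAt q (min k (Dp (PySem.List.dedup paths) q)))
                (PySem.List.dedup paths)).count
                  (labelAt p (min k (Dp (PySem.List.dedup paths) p))) : Nat) :=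
        PySem.Dict.getD_foldl_insert_add_one _ _ _
      rw [hgd, PySem.Dict.getD_empty]
      apply decide_eq_decide.mpr
      omega
    rw [hcol]
    by_cases hbig : ∃ p ∈ paths, k < Dp (PySem.List.dedup paths) p
    · -- some path still collides and escalates
      obtain ⟨p0, hp0p, hp0k⟩ := hbig
      have hp0ks : p0 ∈ PySem.List.dedup paths := (PySem.List.mem_dedup paths p0).mpr hp0p
      have hpred0 : decide (1 < (List.map (fun q => labelAt q (min k (Dp (PySem.List.dedup paths) q)))
          (PySem.List.dedup paths)).count
            (labelAt p0 (min k (Dp (PySem.List.dedup paths) p0)))) = true := by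
        apply decide_eq_true
        exact (count_gt_one_iff hnodup hp0ks _).mpr (collide_of_lt hp0ks hk hp0k)
      have hmemf : p0 ∈ (PySem.List.dedup paths).filter
          (fun p => decide (1 < (List.map (fun q => labelAt q (min k (Dp (PySem.List.dedup paths) q)))
            (PySem.List.dedup paths)).count
              (labelAt p (min k (Dp (PySem.List.dedup paths) p))))) :=
        List.mem_filter.mpr ⟨hp0ks, hpred0⟩
      rw [if_neg (by simp only [List.isEmpty_iff]; exact fun hh => List.ne_nil_of_mem hmemf hh)]
      have hfup := foldupd (fun p => PySem.List.len (parts_map.getD p []))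
        ((PySem.List.dedup paths).filter
          (fun p => decide (1 < (List.map (fun q => labelAt q (min k (Dp (PySem.List.dedup paths) q)))
            (PySem.List.dedup paths)).count
              (labelAt p (min k (Dp (PySem.List.dedup paths) p))))))
        (hnodup.filter _) depth false
      have hany : ((PySem.List.dedup paths).filter
          (fun p => decide (1 < (List.map (fun q => labelAt q (min k (Dp (PySem.List.dedup paths) q)))
            (PySem.List.dedup paths)).count
              (labelAt p (min k (Dp (PySem.List.dedup paths) p)))))).any
            (fun p => decide (depth.getD p 0 < PySem.List.len (parts_map.getD p []))) = true := by
        refine List.any_eq_true.mpr ⟨p0, hmemf, ?_⟩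
        apply decide_eq_true
        rw [hd p0 hp0p, hpm p0 hp0p, PySem.List.len_eq, min_eq_left (by omega)]
        have hle := (Dp_bounds (PySem.List.dedup paths) p0).2
        have : k < Lp p0 := by omega
        exact_mod_cast this
      rw [if_neg (by rw [hfup.2, Bool.false_or, hany]; simp)]
      apply ih (k + 1)
      · omega
      · intro p hp
        rw [hfup.1 p]
        have hpks : p ∈ PySem.List.dedup paths := (PySem.List.mem_dedup paths p).mpr hp
        by_cases hlt : k < Dp (PySem.List.dedup paths) p
        · rw [if_pos ⟨List.mem_filter.mpr ⟨hpks, decide_eq_true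
              ((count_gt_one_iff hnodup hpks _).mpr (collide_of_lt hpks hk hlt))⟩, by
            rw [hd p hp, hpm p hp, PySem.List.len_eq, min_eq_left (by omega)]
            have hle := (Dp_bounds (PySem.List.dedup paths) p).2
            have : k < Lp p := by omega
            exact_mod_cast this⟩]
          rw [hd p hp, min_eq_left (by omega), min_eq_left (by omega)]
          push_cast
          ring
        · have hDple : Dp (PySem.List.dedup paths) p ≤ k := by omega
          rw [if_neg ?hnc, hd p hp, min_eq_right hDple, min_eq_right (by omega)]
          case hnc =>
            rintro ⟨hmem, hltW⟩
            obtain ⟨q, hq, hqne, hqlab⟩ := (count_gt_one_iff hnodup hpks (fun q => labelAt q (min k (Dp (PySem.List.dedup paths) q)))).mp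
              (of_decide_eq_true (List.mem_filter.mp hmem).2)
            obtain ⟨hDL, hkeq, _⟩ := no_bump_of_ge hpks hq hqne hDple hqlab
            rw [hd p hp, hpm p hp, PySem.List.len_eq, min_eq_right hDple, hDL] at hltW
            have : (Lp p : Int) < (Lp p : Int) := by exact_mod_cast hltW
            omega
      · intro p hp
        have := hb p hp
        omega
    · -- no path escalates any more: the loop returns
      push_neg at hbig
      have hnil : (PySem.List.dedup paths).filter
          (fun p => decide (1 < (List.map (fun q => labelAt q (min k (Dp (PySem.List.dedup paths) q)))
            (PySem.List.dedup paths)).count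
              (labelAt p (min k (Dp (PySem.List.dedup paths) p))))) = [] := by
        apply List.filter_eq_nil_iff.mpr
        intro p hp
        simp only [decide_eq_true_eq]
        intro hcount
        obtain ⟨q, hq, hqne, hqlab⟩ := (count_gt_one_iff hnodup hp (fun q => labelAt q (min k (Dp (PySem.List.dedup paths) q)))).mp hcount
        have hDple : Dp (PySem.List.dedup paths) p ≤ k :=
          hbig p ((PySem.List.mem_dedup paths p).mp hp)
        obtain ⟨_, _, hklt⟩ := no_bump_of_ge hp hq hqne hDple hqlab
        have := hbig q ((PySem.List.mem_dedup paths q).mp hq)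
        omega
      rw [hnil]
      rw [if_pos (show ([] : List String).isEmpty = true from rfl)]
      rw [hlab]
      apply List.map_congr_left
      intro p hp
      have hble : Dp (PySem.List.dedup paths) p ≤ k :=
        hbig p ((PySem.List.mem_dedup paths p).mp hp)
      beta_reduce
      rw [min_eq_right hble]
theorem le_foldl_len (paths : List String) : ∀ acc : Nat,
    acc ≤ paths.foldl (fun n q => n + q.length) acc := by
  induction paths with
  | nil => intro acc; simp
  | cons q ps ih =>
    intro acc
    calc acc ≤ acc + q.length := by omega
      _ ≤ _ := ih (acc + q.length)

theorem len_le_foldl_len {paths : List String} {p : String} (hp : p ∈ paths) :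
    ∀ acc : Nat, p.length ≤ paths.foldl (fun n q => n + q.length) acc := by
  induction paths with
  | nil => exact absurd hp (List.not_mem_nil)
  | cons q ps ih =>
    intro acc
    rcases List.mem_cons.mp hp with rfl | hp'
    · calc p.length ≤ acc + p.length := by omega
        _ ≤ _ := le_foldl_len ps (acc + p.length)
    · exact ih hp' (acc + q.length)

theorem friendly_labels_py_spec : Claim_equal_friendly_labels_py := by
  unfold Claim_equal_friendly_labels_py
  intro paths _dom
  unfold Spec_friendly_labels_py
  rw [alt_eq]
  show (faLoop paths
      (paths.foldl (fun d p => d.insert p (pySplitSlash p)) PySem.Dict.empty)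
      (paths.foldl (fun d p => d.insert p 1) PySem.Dict.empty)
      (paths.foldl (fun n p => n + p.length) 0 + 2)).items = _
  apply faLoop_invariant paths _ ?hpm _ 1 _ (le_refl 1) ?hd ?hb
  case hpm =>
    intro p hp
    exact getD_cmap pySplitSlash paths p hp []
  case hd =>
    intro p hp
    rw [getD_cmap (fun _ => (1 : Int)) paths p hp 0]
    rw [min_eq_left (Dp_bounds (PySem.List.dedup paths) p).1]
    simp
  case hb =>
    intro p hp
    have h1 : Dp (PySem.List.dedup paths) p ≤ Lp p := (Dp_bounds _ p).2
    have h2 : Lp p ≤ p.toList.length + 1 := parts_length_le p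
    have h3 : p.length ≤ paths.foldl (fun n q => n + q.length) 0 := len_le_foldl_len hp 0
    have h4 : p.length = p.toList.length := String.length_toList.symm
    omega
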